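-- pv_equiv track=rewrite | github.com/ElixirTechCommunity/Stellaris-Hackathon | submissions/Horizon_KIRO/graph/jarvis_graph.py | _pick_sub_agent
-- ===== SOURCE A (Python) =====
-- from typing import Optional, Any
--
-- def _pick_sub_agent(intent: str, text: str) -> Optional[str]:
--     """Keyword-based heuristic to choose the most likely sub-agent."""
--     t = text.lower()
--     if intent == "file_management":
--         if any(w in t for w in ["duplicate", "dupli", "copy", "same"]):
--             return "duplicate_detector"
--         if any(w in t for w in ["organize", "sort", "arrange", "type", "extension"]):
--             return "file_organizer"
--         if any(w in t for w in ["large", "size", "big", "heavy", "huge", "space"]):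
--             return "large_file_scanner"
--         if any(w in t for w in ["find", "locate", "search", "folder"]):
--             return "folder_finder"
--         return "file_organizer"
--
--     if intent == "diagnostics":
--         if any(w in t for w in ["cpu", "processor", "core", "speed"]):
--             return "cpu_monitor"
--         if any(w in t for w in ["ram", "memory", "gb", "mb"]):
--             return "ram_monitor"
--         if any(w in t for w in ["disk", "storage", "drive", "c:"]):
--             return "disk_monitor"
--         return "system_health_checker"
--
--     if intent == "installer":
--         if any(w in t for w in ["wallpaper", "image", "background", "picture"]):
--             return "resource_downloader"
--         return "winget_engine"
--
--     if intent in ("vision_analysis", "troubleshoot_screen"):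
--         return "screenshot_tool"
--
--     if intent == "maintenance":
--         if any(w in t for w in ["old", "stale", "ancient", "unused"]):
--             return "old_file_scanner"
--         return "temp_file_cleaner"
--
--     if intent == "disk_analysis":
--         if any(w in t for w in ["folder", "directory", "which"]):
--             return "large_folder_finder"
--         return "disk_analyzer"
--
--     return None
-- ===== SOURCE B (Python) =====
-- from typing import Optional
--
-- # One flat, ordered decision list of (intent, keyword, agent) triples.
-- # A rule fires when its intent matches and its keyword occurs in the lowered
-- # text; an empty keyword always matches, which encodes each intent's fallback
-- # as the last rule of that intent. Unknown intents match no rule -> None.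
-- _RULES = [
--     ("file_management", "duplicate", "duplicate_detector"),
--     ("file_management", "dupli", "duplicate_detector"),
--     ("file_management", "copy", "duplicate_detector"),
--     ("file_management", "same", "duplicate_detector"),
--     ("file_management", "organize", "file_organizer"),
--     ("file_management", "sort", "file_organizer"),
--     ("file_management", "arrange", "file_organizer"),
--     ("file_management", "type", "file_organizer"),
--     ("file_management", "extension", "file_organizer"),
--     ("file_management", "large", "large_file_scanner"),
--     ("file_management", "size", "large_file_scanner"),
--     ("file_management", "big", "large_file_scanner"),
--     ("file_management", "heavy", "large_file_scanner"),
--     ("file_management", "huge", "large_file_scanner"),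
--     ("file_management", "space", "large_file_scanner"),
--     ("file_management", "find", "folder_finder"),
--     ("file_management", "locate", "folder_finder"),
--     ("file_management", "search", "folder_finder"),
--     ("file_management", "folder", "folder_finder"),
--     ("file_management", "", "file_organizer"),
--     ("diagnostics", "cpu", "cpu_monitor"),
--     ("diagnostics", "processor", "cpu_monitor"),
--     ("diagnostics", "core", "cpu_monitor"),
--     ("diagnostics", "speed", "cpu_monitor"),
--     ("diagnostics", "ram", "ram_monitor"),
--     ("diagnostics", "memory", "ram_monitor"),
--     ("diagnostics", "gb", "ram_monitor"),
--     ("diagnostics", "mb", "ram_monitor"),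
--     ("diagnostics", "disk", "disk_monitor"),
--     ("diagnostics", "storage", "disk_monitor"),
--     ("diagnostics", "drive", "disk_monitor"),
--     ("diagnostics", "c:", "disk_monitor"),
--     ("diagnostics", "", "system_health_checker"),
--     ("installer", "wallpaper", "resource_downloader"),
--     ("installer", "image", "resource_downloader"),
--     ("installer", "background", "resource_downloader"),
--     ("installer", "picture", "resource_downloader"),
--     ("installer", "", "winget_engine"),
--     ("vision_analysis", "", "screenshot_tool"),
--     ("troubleshoot_screen", "", "screenshot_tool"),
--     ("maintenance", "old", "old_file_scanner"),
--     ("maintenance", "stale", "old_file_scanner"),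
--     ("maintenance", "ancient", "old_file_scanner"),
--     ("maintenance", "unused", "old_file_scanner"),
--     ("maintenance", "", "temp_file_cleaner"),
--     ("disk_analysis", "folder", "large_folder_finder"),
--     ("disk_analysis", "directory", "large_folder_finder"),
--     ("disk_analysis", "which", "large_folder_finder"),
--     ("disk_analysis", "", "disk_analyzer"),
-- ]
--
--
-- def _pick_sub_agent(intent: str, text: str) -> Optional[str]:
--     t = text.lower()
--     return next((agent for i, kw, agent in _RULES if i == intent and kw in t),
--                 None)
-- ===== Notes on version B (the rewrite author's own statement) =====
-- stated objective: alternative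
-- what changed: Replaces A's nested per-intent if-chains with one flat ordered decision list of (intent, keyword, agent) triples scanned by a single first-match search, encoding every fallback as an always-matching empty-keyword sentinel rule (so the control flow is one uniform linear pass instead of grouped branches).
import Mathlib
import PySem

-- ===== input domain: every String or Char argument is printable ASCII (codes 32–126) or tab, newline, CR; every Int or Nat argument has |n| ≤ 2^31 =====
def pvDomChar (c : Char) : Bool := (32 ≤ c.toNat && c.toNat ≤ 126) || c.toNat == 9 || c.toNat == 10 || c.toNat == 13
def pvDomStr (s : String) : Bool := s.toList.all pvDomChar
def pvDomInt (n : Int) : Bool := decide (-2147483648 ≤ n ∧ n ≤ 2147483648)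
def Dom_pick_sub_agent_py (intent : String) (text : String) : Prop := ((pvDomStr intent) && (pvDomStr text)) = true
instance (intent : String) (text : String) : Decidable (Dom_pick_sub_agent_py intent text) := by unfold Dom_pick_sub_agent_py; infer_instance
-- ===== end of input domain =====

-- B flattens A's nested if-chain into one ordered decision list of (intent, keyword, agent)
-- triples scanned by a single first-match search, with empty-keyword sentinel rules as fallbacks; simpler, same cost.

-- ===== PORT A =====
def pick_sub_agent_py (intent : String) (text : String) : Option String :=
  let t := PySem.Str.lower text
  if intent == "file_management" then
    if (["duplicate", "dupli", "copy", "same"].any (fun w => PySem.Str.isIn w t)) then some "duplicate_detector"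
    else if (["organize", "sort", "arrange", "type", "extension"].any (fun w => PySem.Str.isIn w t)) then some "file_organizer"
    else if (["large", "size", "big", "heavy", "huge", "space"].any (fun w => PySem.Str.isIn w t)) then some "large_file_scanner"
    else if (["find", "locate", "search", "folder"].any (fun w => PySem.Str.isIn w t)) then some "folder_finder"
    else some "file_organizer"
  else if intent == "diagnostics" then
    if (["cpu", "processor", "core", "speed"].any (fun w => PySem.Str.isIn w t)) then some "cpu_monitor"
    else if (["ram", "memory", "gb", "mb"].any (fun w => PySem.Str.isIn w t)) then some "ram_monitor"
    else if (["disk", "storage", "drive", "c:"].any (fun w => PySem.Str.isIn w t)) then some "disk_monitor"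
    else some "system_health_checker"
  else if intent == "installer" then
    if (["wallpaper", "image", "background", "picture"].any (fun w => PySem.Str.isIn w t)) then some "resource_downloader"
    else some "winget_engine"
  else if intent == "vision_analysis" || intent == "troubleshoot_screen" then
    some "screenshot_tool"
  else if intent == "maintenance" then
    if (["old", "stale", "ancient", "unused"].any (fun w => PySem.Str.isIn w t)) then some "old_file_scanner"
    else some "temp_file_cleaner"
  else if intent == "disk_analysis" then
    if (["folder", "directory", "which"].any (fun w => PySem.Str.isIn w t)) then some "large_folder_finder"
    else some "disk_analyzer"
  else none

-- ===== PORT B =====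
-- the module-level flat decision list _RULES of Source B
def pvRules : List (String × String × String) :=
  [("file_management", "duplicate", "duplicate_detector"),
   ("file_management", "dupli", "duplicate_detector"),
   ("file_management", "copy", "duplicate_detector"),
   ("file_management", "same", "duplicate_detector"),
   ("file_management", "organize", "file_organizer"),
   ("file_management", "sort", "file_organizer"),
   ("file_management", "arrange", "file_organizer"),
   ("file_management", "type", "file_organizer"),
   ("file_management", "extension", "file_organizer"),
   ("file_management", "large", "large_file_scanner"),
   ("file_management", "size", "large_file_scanner"),
   ("file_management", "big", "large_file_scanner"),
   ("file_management", "heavy", "large_file_scanner"),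
   ("file_management", "huge", "large_file_scanner"),
   ("file_management", "space", "large_file_scanner"),
   ("file_management", "find", "folder_finder"),
   ("file_management", "locate", "folder_finder"),
   ("file_management", "search", "folder_finder"),
   ("file_management", "folder", "folder_finder"),
   ("file_management", "", "file_organizer"),
   ("diagnostics", "cpu", "cpu_monitor"),
   ("diagnostics", "processor", "cpu_monitor"),
   ("diagnostics", "core", "cpu_monitor"),
   ("diagnostics", "speed", "cpu_monitor"),
   ("diagnostics", "ram", "ram_monitor"),
   ("diagnostics", "memory", "ram_monitor"),
   ("diagnostics", "gb", "ram_monitor"),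
   ("diagnostics", "mb", "ram_monitor"),
   ("diagnostics", "disk", "disk_monitor"),
   ("diagnostics", "storage", "disk_monitor"),
   ("diagnostics", "drive", "disk_monitor"),
   ("diagnostics", "c:", "disk_monitor"),
   ("diagnostics", "", "system_health_checker"),
   ("installer", "wallpaper", "resource_downloader"),
   ("installer", "image", "resource_downloader"),
   ("installer", "background", "resource_downloader"),
   ("installer", "picture", "resource_downloader"),
   ("installer", "", "winget_engine"),
   ("vision_analysis", "", "screenshot_tool"),
   ("troubleshoot_screen", "", "screenshot_tool"),
   ("maintenance", "old", "old_file_scanner"),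
   ("maintenance", "stale", "old_file_scanner"),
   ("maintenance", "ancient", "old_file_scanner"),
   ("maintenance", "unused", "old_file_scanner"),
   ("maintenance", "", "temp_file_cleaner"),
   ("disk_analysis", "folder", "large_folder_finder"),
   ("disk_analysis", "directory", "large_folder_finder"),
   ("disk_analysis", "which", "large_folder_finder"),
   ("disk_analysis", "", "disk_analyzer")]

-- Source B's next(...) over the generator: first rule whose intent matches and keyword occurs in t
def pick_sub_agent_py_alt (intent : String) (text : String) : Option String :=
  let t := PySem.Str.lower text
  match pvRules.find? (fun r => r.1 == intent && PySem.Str.isIn r.2.1 t) with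
  | some r => some r.2.2
  | none => none

-- ===== PRECONDITION & SPEC =====
def Spec_pick_sub_agent_py (intent : String) (text : String) (out : Option String) : Prop := out = pick_sub_agent_py_alt intent text
instance (intent : String) (text : String) (out : Option String) : Decidable (Spec_pick_sub_agent_py intent text out) := by unfold Spec_pick_sub_agent_py; infer_instance

-- ===== CLAIM =====
def Claim_equal_pick_sub_agent_py : Prop := ∀ (intent : String) (text : String), Dom_pick_sub_agent_py intent text → Spec_pick_sub_agent_py intent text (pick_sub_agent_py intent text)

-- ===== LEMMAS AND PROOFS =====

-- result of B's scan, as a function of the remaining rule list (proof-only helper)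
def pvF (i t : String) (l : List (String × String × String)) : Option String :=
  match l.find? (fun r => r.1 == i && PySem.Str.isIn r.2.1 t) with
  | some r => some r.2.2
  | none => none

theorem pvF_alt (intent text : String) :
    pick_sub_agent_py_alt intent text = pvF intent (PySem.Str.lower text) pvRules := rfl

theorem pvF_cons (i t gi k ag : String) (l : List (String × String × String)) :
    pvF i t ((gi, k, ag) :: l)
      = if gi = i ∧ PySem.Str.isIn k t = true then some ag else pvF i t l := by
  unfold pvF
  by_cases hg : gi = i
  · by_cases hk : PySem.Str.isIn k t = true
    · simp at hk; simp [List.find?, hg, hk]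
    · simp at hk; simp [List.find?, hg, hk]
  · simp [List.find?, beq_eq_false_iff_ne.mpr hg, hg]

theorem pv_group (gi i t ag : String) (kws : List String) (rest : List (String × String × String)) :
    pvF i t ((kws.map (fun k => (gi, k, ag))) ++ rest)
      = if gi = i ∧ kws.any (fun w => PySem.Str.isIn w t) = true then some ag
        else pvF i t rest := by
  induction kws with
  | nil => simp
  | cons k ks ih =>
    simp only [List.map_cons, List.cons_append, pvF_cons, ih]
    by_cases hg : gi = i
    · by_cases hk : PySem.Str.isIn k t = true
      · simp at hk; simp [hg, hk]
      · simp at hk; simp [hg, hk]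
    · simp [hg]

-- pvRules written as its thirteen keyword groups
theorem pvRules_groups :
    pvRules
      = (["duplicate", "dupli", "copy", "same"].map (fun k => ("file_management", k, "duplicate_detector")))
        ++ ((["organize", "sort", "arrange", "type", "extension"].map (fun k => ("file_management", k, "file_organizer")))
        ++ ((["large", "size", "big", "heavy", "huge", "space"].map (fun k => ("file_management", k, "large_file_scanner")))
        ++ ((["find", "locate", "search", "folder"].map (fun k => ("file_management", k, "folder_finder")))
        ++ (([""].map (fun k => ("file_management", k, "file_organizer")))
        ++ ((["cpu", "processor", "core", "speed"].map (fun k => ("diagnostics", k, "cpu_monitor")))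
        ++ ((["ram", "memory", "gb", "mb"].map (fun k => ("diagnostics", k, "ram_monitor")))
        ++ ((["disk", "storage", "drive", "c:"].map (fun k => ("diagnostics", k, "disk_monitor")))
        ++ (([""].map (fun k => ("diagnostics", k, "system_health_checker")))
        ++ ((["wallpaper", "image", "background", "picture"].map (fun k => ("installer", k, "resource_downloader")))
        ++ (([""].map (fun k => ("installer", k, "winget_engine")))
        ++ (([""].map (fun k => ("vision_analysis", k, "screenshot_tool")))
        ++ (([""].map (fun k => ("troubleshoot_screen", k, "screenshot_tool")))
        ++ ((["old", "stale", "ancient", "unused"].map (fun k => ("maintenance", k, "old_file_scanner")))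
        ++ (([""].map (fun k => ("maintenance", k, "temp_file_cleaner")))
        ++ ((["folder", "directory", "which"].map (fun k => ("disk_analysis", k, "large_folder_finder")))
        ++ (([""].map (fun k => ("disk_analysis", k, "disk_analyzer")))
        ++ ([] : List (String × String × String)))))))))))))))))) := rfl

-- ===== VERDICT =====
theorem pick_sub_agent_py_spec : Claim_equal_pick_sub_agent_py := by
  intro intent text _
  unfold Spec_pick_sub_agent_py
  rw [pvF_alt, pvRules_groups]
  simp only [pv_group]
  unfold pick_sub_agent_py
  by_cases h1 : intent = "file_management"
  · subst h1; simp
  by_cases h2 : intent = "diagnostics"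
  · subst h2; simp
  by_cases h3 : intent = "installer"
  · subst h3; simp
  by_cases h4 : intent = "vision_analysis"
  · subst h4; simp
  by_cases h5 : intent = "troubleshoot_screen"
  · subst h5; simp
  by_cases h6 : intent = "maintenance"
  · subst h6; simp
  by_cases h7 : intent = "disk_analysis"
  · subst h7; simp
  simp [pvF, Ne.symm h1, Ne.symm h2, Ne.symm h3, Ne.symm h4, Ne.symm h5, Ne.symm h6, Ne.symm h7,
    h1, h2, h3, h4, h5, h6, h7]
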